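-- pv_equiv track=rewrite | github.com/benjkrueger/Picross_Solver | picross.py | get_rid_of_bad_possibilities
-- ===== SOURCE A (Python) =====
-- def get_rid_of_bad_possibilities(line, possibilities):
--     """Analyzes which possibilities in possibilities can work with the line.
--         Returns only those possibilities that work."""
--
--     def possibility_can_work(possibility):
--         assert len(line) == len(possibility)
--         for ix, elem in enumerate(line):
--             if elem != 0:
--                 if elem != possibility[ix]:
--                     return False
--         return True
--
--     ans = []
--     for p in possibilities:
--         if possibility_can_work(p):
--             ans.append(p)
--     return ans
-- ===== SOURCE B (Python) =====
-- def get_rid_of_bad_possibilities(line, possibilities):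
--     """Column-wise staged refinement: for each nonzero cell of the line,
--     successively filter the remaining possibility list by that single cell."""
--     remaining = list(possibilities)
--     for ix, elem in enumerate(line):
--         if elem != 0:
--             remaining = [p for p in remaining if p[ix] == elem]
--     return remaining
-- ===== Notes on version B (the rewrite author's own statement) =====
-- stated objective: alternative
-- what changed: B transposes the traversal: instead of A's per-possibility scan of the whole line with an early-return helper, B loops over the line's positions and, at each nonzero cell, filters the shrinking candidate list by that one cell (staged column-wise refinement).
import Mathlib
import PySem

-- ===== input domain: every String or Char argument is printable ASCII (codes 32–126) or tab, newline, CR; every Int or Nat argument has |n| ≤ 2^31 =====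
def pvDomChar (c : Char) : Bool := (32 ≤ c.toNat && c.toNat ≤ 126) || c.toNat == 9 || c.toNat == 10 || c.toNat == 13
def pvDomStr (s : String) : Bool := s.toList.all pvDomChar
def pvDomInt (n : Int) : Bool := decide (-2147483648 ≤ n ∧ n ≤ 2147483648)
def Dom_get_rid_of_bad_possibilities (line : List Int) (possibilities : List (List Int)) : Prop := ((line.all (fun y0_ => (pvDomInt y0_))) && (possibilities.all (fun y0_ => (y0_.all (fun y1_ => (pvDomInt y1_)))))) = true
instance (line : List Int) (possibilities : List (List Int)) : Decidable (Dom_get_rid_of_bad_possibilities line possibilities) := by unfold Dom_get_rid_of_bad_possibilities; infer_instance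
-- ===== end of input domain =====

-- B replaces A's per-possibility line scan with column-wise staged refinement over the line's
-- nonzero cells (alternative decomposition, similar cost). Equivalence is claimed on Pre_
-- (every possibility has the line's length); outside Pre_ A raises AssertionError.

-- ===== PORT A =====
-- early-returning inner loop 'for ix, elem in enumerate(line)' of possibility_can_work
def pvCanWorkLoop (p : List Int) : List (Int × Int) → Bool
  | [] => true
  | (ix, elem) :: rest =>
    if elem ≠ 0 then
      if elem ≠ (PySem.List.pyGet? p ix).getD 0 then false else pvCanWorkLoop p rest
    else pvCanWorkLoop p rest

def get_rid_of_bad_possibilities (line : List Int) (possibilities : List (List Int)) : List (List Int) :=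
  -- 'assert len(line) == len(possibility)': on failure Python raises (excluded by Pre_);
  -- the port makes the helper return false there, which Pre_ renders unreachable.
  let possibility_can_work := fun (p : List Int) =>
    if line.length = p.length then pvCanWorkLoop p (PySem.List.enumerate line 0) else false
  possibilities.foldl (fun ans p => if possibility_can_work p then ans ++ [p] else ans) []

-- ===== PORT B =====
-- 'remaining = list(possibilities)', then 'for ix, elem in enumerate(line): if elem != 0: filter'
def get_rid_of_bad_possibilities_alt (line : List Int) (possibilities : List (List Int)) : List (List Int) :=
  (PySem.List.enumerate line 0).foldl
    (fun remaining q =>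
      if q.2 ≠ 0 then remaining.filter (fun p => (PySem.List.pyGet? p q.1).getD 0 == q.2)
      else remaining)
    possibilities

-- ===== PRECONDITION & SPEC =====
-- Pre_ excludes exactly the inputs where A raises AssertionError: some possibility whose length
-- differs from the line's.
def Pre_get_rid_of_bad_possibilities (line : List Int) (possibilities : List (List Int)) : Prop :=
  ∀ p ∈ possibilities, p.length = line.length
instance (line : List Int) (possibilities : List (List Int)) : Decidable (Pre_get_rid_of_bad_possibilities line possibilities) := by unfold Pre_get_rid_of_bad_possibilities; infer_instance
def pvWitness_get_rid_of_bad_possibilities : List Int × List (List Int) :=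
  ([1, 0], [[1, 2], [2, 2], [1, 3]])

def Spec_get_rid_of_bad_possibilities (line : List Int) (possibilities : List (List Int)) (out : List (List Int)) : Prop := out = get_rid_of_bad_possibilities_alt line possibilities
instance (line : List Int) (possibilities : List (List Int)) (out : List (List Int)) : Decidable (Spec_get_rid_of_bad_possibilities line possibilities out) := by unfold Spec_get_rid_of_bad_possibilities; infer_instance

-- ===== CLAIM (what is proved, stated in full; the proofs are below) =====
def Claim_equal_get_rid_of_bad_possibilities : Prop := ∀ (line : List Int) (possibilities : List (List Int)), Dom_get_rid_of_bad_possibilities line possibilities → Pre_get_rid_of_bad_possibilities line possibilities → Spec_get_rid_of_bad_possibilities line possibilities (get_rid_of_bad_possibilities line possibilities)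

-- ===== LEMMAS AND PROOFS =====

-- B's staged refinement over any constraint list equals filtering by A's early-returning scan.
theorem pvRefine_eq (L : List (Int × Int)) (ps : List (List Int)) :
    L.foldl
      (fun remaining q =>
        if q.2 ≠ 0 then remaining.filter (fun p => (PySem.List.pyGet? p q.1).getD 0 == q.2)
        else remaining)
      ps
      = ps.filter (fun p => pvCanWorkLoop p L) := by
  induction L generalizing ps with
  | nil => simp [pvCanWorkLoop]
  | cons q rest ih =>
    obtain ⟨ix, elem⟩ := q
    by_cases h : elem = 0
    · simpa [h, pvCanWorkLoop] using ih ps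
    · rw [List.foldl_cons]
      simp only [h, if_pos, ne_eq, not_false_eq_true]
      rw [ih, List.filter_filter]
      refine List.filter_congr (fun p _ => ?_)
      by_cases h2 : (PySem.List.pyGet? p ix).getD 0 = elem
      · simp [pvCanWorkLoop, h, h2]
      · have h2' : elem ≠ (PySem.List.pyGet? p ix).getD 0 := fun hh => h2 hh.symm
        simp [pvCanWorkLoop, h, h2, h2']

-- ===== VERDICT (by name: the statement is the Claim_ definition above) =====
theorem get_rid_of_bad_possibilities_spec : Claim_equal_get_rid_of_bad_possibilities := by
  intro line possibilities _ hpre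
  unfold Spec_get_rid_of_bad_possibilities get_rid_of_bad_possibilities get_rid_of_bad_possibilities_alt
  rw [PySem.List.foldl_append_if, pvRefine_eq]
  simp only [List.nil_append, List.map_id']
  exact List.filter_congr (fun p hp => by simp [hpre p hp])
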